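-- pv_equiv track=rewrite | github.com/Vulcan-Logic/AMD | task1try2.py | addPlus
-- ===== SOURCE A (Python) =====
-- def addPlus(equation):
--     # add a plus sign in front of negative signs to give us a valid equation for processing
--     nsEquation=""
--     returnEquation=""
--     #strip out all blank spaces
--     for indx in range(len(equation)):
--         if equation[indx]!=" ":
--             nsEquation+=equation[indx]
--     #test for a blank string
--     if len(nsEquation)==0:
--             return("")
--     #test for a single character that might be a number
--     elif len(nsEquation)==1:
--         if nsEquation[0] not in ["0","1","2","3","4","5","6","7","8","9"]:
--             return("")
--         else:
--             return(nsEquation)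
--     #process input string that is more than one character
--     elif len(nsEquation)>1:
--         for indx in range(len(nsEquation)):
--             if ((indx!=0) and (indx<=len(nsEquation)-2)):
--                 if (nsEquation[indx]=="-") and\
--                     (nsEquation[indx+1] in ["0","1","2","3","4","5","6","7","8","9",".","("]) and\
--                         (nsEquation[indx-1] not in ["*","/","+"]):
--                     #if current character is a negative sign followed by a number, decimal or bracket add a + in front of it
--                     returnEquation+="+"
--                     returnEquation+=nsEquation[indx]
--                 else:
--                     #just add the character as it is
--                     returnEquation+=nsEquation[indx]
--             else:
--                 if indx==len(nsEquation)-1 and nsEquation[indx]=="-":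
--                     #a negative sign at the last character - invalid equation
--                     return("E")
--                 else:
--                     #a character at the last position return it as it is
--                     returnEquation+=nsEquation[indx]
--     return(returnEquation)
-- ===== SOURCE B (Python) =====
-- def addPlus(equation):
--     # Split on '-' and rejoin, deciding each separator from the adjacent pieces.
--     s = equation.replace(' ', '')
--     if not s:
--         return ''
--     if len(s) == 1:
--         return s if s in '0123456789' else ''
--     if s.endswith('-'):
--         return 'E'
--     parts = s.split('-')
--     out = [parts[0]]
--     for k in range(1, len(parts)):
--         left, right = parts[k - 1], parts[k]
--         sign = '+-' if (not (k == 1 and left == '')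
--                         and (right[:1] or '-') in '0123456789.('
--                         and (left[-1:] or '-') not in '*/+') else '-'
--         out.append(sign)
--         out.append(right)
--     return ''.join(out)
-- ===== Notes on version B (the rewrite author's own statement) =====
-- stated objective: faster
-- what changed: B splits the space-stripped string on the minus character and rejoins the pieces, choosing the separator per boundary from the last char of the left piece and the first char of the right piece, instead of A's index-by-index scan with bounds tests, indexed neighbour lookups and repeated string concatenation; the trailing-minus invalid case becomes a single up-front endswith test.
import Mathlib
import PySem

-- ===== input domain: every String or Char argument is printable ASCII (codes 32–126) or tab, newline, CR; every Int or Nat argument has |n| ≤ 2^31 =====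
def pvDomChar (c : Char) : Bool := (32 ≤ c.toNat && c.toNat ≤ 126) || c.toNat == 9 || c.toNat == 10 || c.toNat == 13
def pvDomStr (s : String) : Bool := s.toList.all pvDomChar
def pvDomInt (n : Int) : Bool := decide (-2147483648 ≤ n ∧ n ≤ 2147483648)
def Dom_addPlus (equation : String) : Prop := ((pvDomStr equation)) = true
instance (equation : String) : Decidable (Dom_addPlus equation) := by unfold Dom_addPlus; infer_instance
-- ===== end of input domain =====

-- B splits the space-stripped string on '-' and rejoins the pieces, deciding each separator
-- ('-' vs '+-') from the adjacent pieces, instead of A's index-by-index scan with repeated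
-- string concatenation (measured faster); return values proved equal on all inputs (A is total).

-- the three character sets both Pythons test membership in
def pvDigits : List Char := ['0','1','2','3','4','5','6','7','8','9']
def pvNext : List Char := ['0','1','2','3','4','5','6','7','8','9','.','(']
def pvPrev : List Char := ['*','/','+']

-- ===== PORT A =====
-- the `for indx in range(len(nsEquation))` loop, with its early `return "E"`
def addPlusLoop (ns : List Char) (i : Nat) (acc : List Char) : String :=
  if h : i < ns.length then
    if i ≠ 0 ∧ i ≤ ns.length - 2 then
      if ns.getD i ' ' = '-' ∧ ns.getD (i+1) ' ' ∈ pvNext ∧ ns.getD (i-1) ' ' ∉ pvPrev then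
        addPlusLoop ns (i+1) (acc ++ ['+', ns.getD i ' '])
      else
        addPlusLoop ns (i+1) (acc ++ [ns.getD i ' '])
    else
      if i = ns.length - 1 ∧ ns.getD i ' ' = '-' then "E"
      else addPlusLoop ns (i+1) (acc ++ [ns.getD i ' '])
  else String.mk acc
termination_by ns.length - i
decreasing_by all_goals omega

def addPlus (equation : String) : String :=
  -- strip out all blank spaces (the first for-loop, appending char by char)
  let ns := equation.toList.foldl (fun acc c => if c ≠ ' ' then acc ++ [c] else acc) []
  if ns.length = 0 then ""
  else if ns.length = 1 then
    if ns.getD 0 ' ' ∉ pvDigits then "" else String.mk ns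
  else addPlusLoop ns 0 []

-- ===== PORT B =====
-- s.split('-') : first piece and the list of remaining pieces (a Python split is never empty)
def pvSplit : List Char → List Char × List (List Char)
  | [] => ([], [])
  | c :: t =>
      let (h, r) := pvSplit t
      if c = '-' then ([], h :: r) else (c :: h, r)

-- the `for k in range(1, len(parts))` loop: carries `left` (= parts[k-1]) and the `k == 1` flag
def pvRejoin : Bool → List Char → List (List Char) → List Char
  | _, _, [] => []
  | first, left, right :: rest =>
      (if ¬(first = true ∧ left = []) ∧ right.headD '-' ∈ pvNext ∧ left.getLastD '-' ∉ pvPrev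
       then ['+', '-'] else ['-']) ++ right ++ pvRejoin false right rest

def addPlus_alt (equation : String) : String :=
  let l := equation.toList.filter (fun c => c != ' ')
  if l.isEmpty then ""
  else if l.length = 1 then
    if l.getD 0 ' ' ∈ pvDigits then String.mk l else ""
  else if l.getD (l.length - 1) ' ' = '-' then "E"
  else
    let (h, r) := pvSplit l
    String.mk (h ++ pvRejoin true h r)

-- ===== PRECONDITION & SPEC =====
def Spec_addPlus (equation : String) (out : String) : Prop := out = addPlus_alt equation
instance (equation : String) (out : String) : Decidable (Spec_addPlus equation out) := by unfold Spec_addPlus; infer_instance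

-- ===== CLAIM (what is proved, stated in full; the proofs are below) =====
def Claim_equal_addPlus : Prop := ∀ (equation : String), Dom_addPlus equation → Spec_addPlus equation (addPlus equation)

-- ===== LEMMAS AND PROOFS =====

-- what A emits for an interior character c with neighbours p (before) and n (after)
def pvChunk (p c n : Char) : List Char :=
  if c = '-' ∧ n ∈ pvNext ∧ p ∉ pvPrev then ['+', c] else [c]

-- the common characterisation: interior chars rewritten from their neighbours, last char kept
def pvG (p : Char) : List Char → List Char
  | [] => []
  | [c] => [c]
  | c :: d :: t => pvChunk p c d ++ pvG c (d :: t)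

-- pvRejoin after the first step, with only the last char of `left` retained
def pvR (p : Char) : List (List Char) → List Char
  | [] => []
  | right :: rest =>
      (if right.headD '-' ∈ pvNext ∧ p ∉ pvPrev then ['+', '-'] else ['-'])
        ++ right ++ pvR (right.getLastD '-') rest

theorem pvFoldlFilter (l : List Char) (acc : List Char) :
    l.foldl (fun acc c => if c ≠ ' ' then acc ++ [c] else acc) acc
      = acc ++ l.filter (fun c => c != ' ') := by
  induction l generalizing acc with
  | nil => simp
  | cons x xs ih =>
    rw [List.foldl_cons]
    by_cases hx : x = ' '
    · rw [if_neg (by simp [hx]), ih]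
      simp [List.filter_cons, hx]
    · rw [if_pos hx, ih]
      simp [List.filter_cons, hx]

theorem pvGetD_append_add (l1 l2 : List Char) (k : Nat) (d : Char) :
    (l1 ++ l2).getD (l1.length + k) d = l2.getD k d := by
  induction l1 with
  | nil => simp
  | cons x xs ih => simpa [Nat.succ_add] using ih

theorem pvLoopLemma (rest : List Char) : ∀ (pre : List Char) (a b : Char) (acc : List Char),
    addPlusLoop (pre ++ a :: b :: rest) (pre.length + 1) acc =
      if (b :: rest).getD rest.length ' ' = '-' then "E"
      else String.mk (acc ++ pvG a (b :: rest)) := by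
  induction rest with
  | nil =>
    intro pre a b acc
    rw [addPlusLoop]
    have hlt : pre.length + 1 < (pre ++ a :: b :: []).length := by simp
    rw [dif_pos hlt]
    have hns : ¬ (pre.length + 1 ≠ 0 ∧ pre.length + 1 ≤ (pre ++ a :: b :: []).length - 2) := by
      simp
    rw [if_neg hns]
    have hb : (pre ++ a :: b :: []).getD (pre.length + 1) ' ' = b :=
      pvGetD_append_add pre [a, b] 1 ' '
    rw [hb]
    have hidx : pre.length + 1 = (pre ++ a :: b :: []).length - 1 := by simp
    by_cases hbm : b = '-'
    · rw [if_pos ⟨hidx, hbm⟩]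
      simp [hbm]
    · rw [if_neg (fun hcon => hbm hcon.2)]
      rw [addPlusLoop, dif_neg (by simp)]
      simp [hbm, pvG]
  | cons c t ih =>
    intro pre a b acc
    rw [addPlusLoop]
    have h1 : (pre ++ a :: b :: c :: t).length = pre.length + 3 + t.length := by
      simp; omega
    have hb : (pre ++ a :: b :: c :: t).getD (pre.length + 1) ' ' = b :=
      pvGetD_append_add pre (a :: b :: c :: t) 1 ' '
    have hc : (pre ++ a :: b :: c :: t).getD (pre.length + 1 + 1) ' ' = c :=
      pvGetD_append_add pre (a :: b :: c :: t) 2 ' '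
    have ha : (pre ++ a :: b :: c :: t).getD (pre.length + 1 - 1) ' ' = a :=
      pvGetD_append_add pre (a :: b :: c :: t) 0 ' '
    have hlt : pre.length + 1 < (pre ++ a :: b :: c :: t).length := by rw [h1]; omega
    have hint : pre.length + 1 ≠ 0 ∧ pre.length + 1 ≤ (pre ++ a :: b :: c :: t).length - 2 := by
      rw [h1]; omega
    rw [dif_pos hlt, if_pos hint, hb, hc, ha]
    have hre : pre ++ a :: b :: c :: t = (pre ++ [a]) ++ b :: c :: t := by simp
    have hlen : pre.length + 1 + 1 = (pre ++ [a]).length + 1 := by simp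
    have hgl : (b :: c :: t).getD (c :: t).length ' ' = (c :: t).getD t.length ' ' := rfl
    by_cases hcond : b = '-' ∧ c ∈ pvNext ∧ a ∉ pvPrev
    · rw [if_pos hcond, hre, hlen, ih]
      have hch : pvChunk a b c = ['+', b] := by simp [pvChunk, hcond]
      rw [hgl]
      simp only [pvG, hch, List.append_assoc, List.cons_append, List.nil_append]
    · rw [if_neg hcond, hre, hlen, ih]
      have hch : pvChunk a b c = [b] := by simp [pvChunk, hcond]
      rw [hgl]
      simp only [pvG, hch, List.append_assoc, List.cons_append, List.nil_append]

theorem pvLoopStart (a b : Char) (rest : List Char) :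
    addPlusLoop (a :: b :: rest) 0 [] = addPlusLoop (a :: b :: rest) 1 [a] := by
  rw [addPlusLoop]
  have hlt : 0 < (a :: b :: rest).length := by simp
  rw [dif_pos hlt]
  have h0 : ¬ ((0 : Nat) ≠ 0 ∧ 0 ≤ (a :: b :: rest).length - 2) := by simp
  rw [if_neg h0]
  have h1 : ¬ ((0 : Nat) = (a :: b :: rest).length - 1 ∧ (a :: b :: rest).getD 0 ' ' = '-') := by
    simp
  rw [if_neg h1]
  rfl

-- after the first boundary, pvRejoin only depends on the last char of `left`
theorem pvRejoin_false (r : List (List Char)) : ∀ left : List Char,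
    pvRejoin false left r = pvR (left.getLastD '-') r := by
  induction r with
  | nil => intro left; rfl
  | cons right rest ih =>
    intro left
    simp only [pvRejoin, pvR, ih right]
    congr 1
    simp

theorem pvRejoin_true_of_ne (left : List Char) (hne : left ≠ []) (r : List (List Char)) :
    pvRejoin true left r = pvRejoin false left r := by
  cases r with
  | nil => rfl
  | cons right rest =>
    simp only [pvRejoin]
    congr 2
    simp [hne]

-- one unfolding step of pvSplit
theorem pvSplit_cons (c : Char) (t : List Char) :
    pvSplit (c :: t) = if c = '-' then ([], (pvSplit t).1 :: (pvSplit t).2)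
      else (c :: (pvSplit t).1, (pvSplit t).2) := by
  rcases hp : pvSplit t with ⟨h, r⟩
  simp [pvSplit, hp]

-- the first character of u is the headD of the first split piece
theorem pvSplit_headD (d : Char) (t : List Char) :
    ((pvSplit (d :: t)).1).headD '-' = d := by
  by_cases hd : d = '-' <;> simp [pvSplit, hd]

-- the split-rejoin of u, with p the character preceding u, equals the neighbour rewrite pvG
theorem pvSJ (u : List Char) : u ≠ [] → u.getLastD ' ' ≠ '-' → ∀ p : Char,
    (pvSplit u).1 ++ pvR (((pvSplit u).1).getLastD p) (pvSplit u).2 = pvG p u := by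
  induction u with
  | nil => intro h; exact absurd rfl h
  | cons c u' ih =>
    intro _ hlast p
    cases u' with
    | nil =>
      have hc : c ≠ '-' := by simpa using hlast
      simp [pvSplit, hc, pvR, pvG]
    | cons d t =>
      have hlast' : (d :: t).getLastD ' ' ≠ '-' := by
        simpa [List.getLastD_cons] using hlast
      have ihdt := ih (by simp) hlast'
      rcases hs : pvSplit (d :: t) with ⟨h', r'⟩
      have hhead : h'.headD '-' = d := by
        have := pvSplit_headD d t; rw [hs] at this; exact this
      by_cases hc : c = '-'
      · -- c is a dash: first piece empty, boundary decided from p and d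
        subst hc
        have hrest : h' ++ pvR (h'.getLastD '-') r' = pvG '-' (d :: t) := by
          have := ihdt '-'; rw [hs] at this; exact this
        rw [pvSplit_cons, hs, if_pos (rfl : ('-' : Char) = '-')]
        simp only [List.getLastD_nil, List.nil_append]
        simp only [pvR, hhead, pvG, pvChunk]
        simp only [true_and]
        simp only [List.append_assoc]
        exact congrArg (fun z => (if d ∈ pvNext ∧ p ∉ pvPrev then ['+', '-'] else ['-']) ++ z) hrest
      · -- c is not a dash: it joins the first piece
        have hrest : h' ++ pvR (h'.getLastD c) r' = pvG c (d :: t) := by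
          have := ihdt c; rw [hs] at this; exact this
        rw [pvSplit_cons, hs, if_neg hc]
        simp only [pvG, pvChunk]
        have hcc : ¬(c = '-' ∧ d ∈ pvNext ∧ p ∉ pvPrev) := fun h => hc h.1
        rw [if_neg hcc]
        simp only [List.cons_append, List.nil_append, List.getLastD_cons]
        rw [hrest]

-- last element via getD at length-1
theorem pvGetD_last : ∀ (u : List Char) (d : Char), u.getD (u.length - 1) d = u.getLastD d
  | [], _ => rfl
  | [_], _ => rfl
  | x :: y :: ys, d => by
    have h1 : (x :: y :: ys).getD ((x :: y :: ys).length - 1) d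
        = (y :: ys).getD ((y :: ys).length - 1) d := by
      simp [List.length_cons]
      rfl
    rw [h1, pvGetD_last (y :: ys) d]
    simp [List.getLastD_cons]

-- ===== VERDICT (by name: the statement is the Claim_ definition above) =====
theorem addPlus_spec : Claim_equal_addPlus := by
  intro equation _
  unfold Spec_addPlus addPlus addPlus_alt
  rw [pvFoldlFilter]
  simp only [List.nil_append]
  cases h : equation.toList.filter (fun c => c != ' ') with
  | nil => simp
  | cons x xs =>
    cases xs with
    | nil =>
      by_cases hx : x ∈ pvDigits <;> simp [hx]
    | cons y ys =>
      have hne : ¬ (x :: y :: ys).length = 0 := by simp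
      have hne1 : ¬ (x :: y :: ys).length = 1 := by simp
      rw [if_neg hne, if_neg hne1]
      rw [pvLoopStart]
      have hloop := pvLoopLemma ys [] x y [x]
      simp only [List.nil_append, List.length_nil, Nat.zero_add] at hloop
      rw [hloop]
      have hempty : (x :: y :: ys).isEmpty = false := by simp
      have hlastD : (x :: y :: ys).getD ((x :: y :: ys).length - 1) ' '
          = (y :: ys).getD ys.length ' ' := by
        have h2 : (y :: ys).getD ys.length ' ' = (y :: ys).getD ((y :: ys).length - 1) ' ' := by
          simp
        rw [h2, pvGetD_last, pvGetD_last]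
        simp [List.getLastD_cons]
      rw [hempty]
      simp only [Bool.false_eq_true, if_false, hne1, if_false, hlastD]
      by_cases hd : (y :: ys).getD ys.length ' ' = '-'
      · rw [if_pos hd, if_pos hd]
      · rw [if_neg hd, if_neg hd]
        have hlast : (x :: y :: ys).getLastD ' ' ≠ '-' := by
          rw [← pvGetD_last]
          rw [hlastD]; exact hd
        have hsj := pvSJ (x :: y :: ys) (by simp) hlast
        by_cases hx : x = '-'
        · -- leading dash: first split piece is empty, at_start suppresses the '+'
          subst hx
          rcases hs : pvSplit (y :: ys) with ⟨h', r'⟩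
          have hlast' : (y :: ys).getLastD ' ' ≠ '-' := by
            simpa [List.getLastD_cons] using hlast
          have hrest : h' ++ pvR (h'.getLastD '-') r' = pvG '-' (y :: ys) := by
            have := pvSJ (y :: ys) (by simp) hlast' '-'
            rw [hs] at this; exact this
          rw [pvSplit_cons, hs, if_pos (rfl : ('-' : Char) = '-')]
          simp only [pvRejoin, List.nil_append]
          rw [pvRejoin_false]
          simp only [not_true, true_and, false_and, if_false]
          simp only [List.cons_append, List.nil_append, List.append_assoc]
          exact congrArg (fun z => String.mk ('-' :: z)) hrest.symm
        · have hhne : (pvSplit (x :: y :: ys)).1 ≠ [] := by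
            rcases hs : pvSplit (y :: ys) with ⟨h', r'⟩
            rw [pvSplit_cons, hs, if_neg hx]
            simp
          rw [pvRejoin_true_of_ne _ hhne, pvRejoin_false]
          have := hsj '-'
          rw [this]
          simp only [pvG, pvChunk]
          have : ¬(x = '-' ∧ y ∈ pvNext ∧ '-' ∉ pvPrev) := fun hcc => hx hcc.1
          rw [if_neg this]
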